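-- pv_equiv track=rewrite | github.com/kildegaard/fcen | elementos-de-programacion-FCEN/Taller_1/main.py | esConcava
-- ===== SOURCE A (Python) =====
-- def esConcava(lista):
--     esConc = False
--     contador = []
--     if 0 <= len(lista) <= 2:                            # Me saco el problema de lista vacia, 1 y 2 elementos, que siempre es cóncavo
--         esConc = True
--     else:
--         for valor in range(len(lista)-1):               # Con este for recorro la lista y marco los posibles cambios de inflexión
--             if   lista[valor+1] < lista[valor]:
--                 contador.append('-')
--             elif lista[valor+1] > lista[valor]:
--                 contador.append('+')
--
--     if   contador.count('+') == 0 or contador.count('-') == 0: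
--         esConc = True                                   # Agarra los casos de todo positivo, todo negativo o meseta que son cóncavos
--     elif contador.index('+') > contador.index('-'):     # Sería cóncavo A MENOS que luego vuelva a haber negativo ("firulete")
--         contadorRecortado = contador[contador.index('+'):]
--         if contadorRecortado.count('-') == 0:           # Chequeo que luego de la situación [- - - +] (cóncavo) no haya otros - ("firulete")
--             esConc = True
--
--     return esConc
-- ===== SOURCE B (Python) =====
-- def esConcava(lista):
--     increasing = False
--     for a, b in zip(lista, lista[1:]):
--         if b > a:
--             increasing = True
--         elif b < a and increasing:
--             return False
--     return True
-- ===== Notes on version B (the rewrite author's own statement) =====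
-- stated objective: simpler
-- what changed: Replaces the build-a-sign-list-then-rescan-with-count/index/slice approach by a single pass over consecutive pairs maintaining one boolean flag, returning False at the first decrease that follows an increase.
import Mathlib
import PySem

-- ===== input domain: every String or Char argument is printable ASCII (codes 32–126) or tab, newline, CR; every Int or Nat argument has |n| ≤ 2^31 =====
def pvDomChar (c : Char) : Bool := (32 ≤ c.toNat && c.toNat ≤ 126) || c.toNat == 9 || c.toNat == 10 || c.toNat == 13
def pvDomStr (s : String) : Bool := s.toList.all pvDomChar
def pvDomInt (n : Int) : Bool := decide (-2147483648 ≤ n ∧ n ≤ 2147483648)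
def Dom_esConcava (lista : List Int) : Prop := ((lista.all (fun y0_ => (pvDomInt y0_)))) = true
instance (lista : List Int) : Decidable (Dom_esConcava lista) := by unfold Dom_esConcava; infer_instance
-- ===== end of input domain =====

-- B replaces A's build-a-sign-list-then-rescan (count/index/slice) approach by one pass over
-- consecutive pairs with a single boolean flag; objective: simpler (same O(n) cost).

-- ===== PORT A =====
-- loop body: 'if lista[valor+1] < lista[valor]: contador.append("-") elif …: contador.append("+")'
def pvStepA (lista : List Int) (acc : List Char) (valor : Int) : List Char :=
  if PySem.List.pyGetD lista (valor + 1) 0 < PySem.List.pyGetD lista valor 0 then acc ++ ['-']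
  else if PySem.List.pyGetD lista valor 0 < PySem.List.pyGetD lista (valor + 1) 0 then acc ++ ['+']
  else acc

-- the post-loop block of A ('if contador.count(...) … return esConc'), with esConc as computed before it
def pvTailA (contador : List Char) (esConc : Bool) : Bool :=
  if contador.count '+' = 0 ∨ contador.count '-' = 0 then true
  else if (PySem.List.index? contador '-').getD 0 < (PySem.List.index? contador '+').getD 0 then
    -- contadorRecortado = contador[contador.index('+'):]
    if (PySem.List.slice contador (some (((PySem.List.index? contador '+').getD 0 : Nat) : Int)) none).count '-' = 0
    then true else esConc
  else esConc

-- 'if 0 <= len(lista) <= 2: esConc = True  else: for valor in range(len(lista)-1): …',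
-- then the post-loop block (pvTailA) on the resulting contador and esConc
def esConcava (lista : List Int) : Bool :=
  pvTailA
    (if 0 ≤ (lista.length : Int) ∧ (lista.length : Int) ≤ 2 then []
     else (PySem.List.pyRange 0 ((lista.length : Int) - 1) 1).foldl (pvStepA lista) [])
    (decide (0 ≤ (lista.length : Int) ∧ (lista.length : Int) ≤ 2))

-- ===== PORT B =====
-- 'for a, b in zip(lista, lista[1:]): …' with early return False
def pvGoB : Bool → List (Int × Int) → Bool
  | _, [] => true
  | increasing, (a, b) :: rest =>
    if a < b then pvGoB true rest
    else if b < a ∧ increasing = true then false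
    else pvGoB increasing rest

def esConcava_alt (lista : List Int) : Bool :=
  pvGoB false (lista.zip (PySem.List.slice lista (some 1) none))

-- ===== PRECONDITION & SPEC =====
def Spec_esConcava (lista : List Int) (out : Bool) : Prop := out = esConcava_alt lista
instance (lista : List Int) (out : Bool) : Decidable (Spec_esConcava lista out) := by unfold Spec_esConcava; infer_instance

-- ===== CLAIM (what is proved, stated in full; the proofs are below) =====
def Claim_equal_esConcava : Prop := ∀ (lista : List Int), Dom_esConcava lista → Spec_esConcava lista (esConcava lista)

-- ===== LEMMAS AND PROOFS =====

-- the sign list A's loop builds, written structurally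
def pvSigns : List Int → List Char
  | a :: b :: r => (if b < a then ['-'] else if a < b then ['+'] else []) ++ pvSigns (b :: r)
  | _ => []

-- the state machine both sides reduce to, on the sign list
def pvOk : Bool → List Char → Bool
  | _, [] => true
  | inc, c :: s => if c = '+' then pvOk true s else if c = '-' ∧ inc = true then false else pvOk inc s

theorem pvOk_false_short (s : List Char) (h : s.length ≤ 1) : pvOk false s = true := by
  match s with
  | [] => rfl
  | [c] => simp [pvOk]
  | _ :: _ :: _ => simp at h

theorem pvSigns_chars (l : List Int) : ∀ c ∈ pvSigns l, c = '+' ∨ c = '-' := by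
  match l with
  | [] => simp [pvSigns]
  | [_] => simp [pvSigns]
  | a :: b :: r =>
    intro c hc
    simp only [pvSigns, List.mem_append] at hc
    rcases hc with hc | hc
    · split_ifs at hc <;> simp_all
    · exact pvSigns_chars (b :: r) c hc

-- B side: the pair scan is the state machine on the sign list
theorem pvGoB_eq_pvOk (l : List Int) : ∀ inc, pvGoB inc (l.zip l.tail) = pvOk inc (pvSigns l) := by
  match l with
  | [] => intro inc; rfl
  | [_] => intro inc; rfl
  | a :: b :: r =>
    intro inc
    have ih := pvGoB_eq_pvOk (b :: r)
    simp only [List.tail_cons] at ih ⊢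
    simp only [List.zip_cons_cons, pvGoB, pvSigns]
    rcases lt_trichotomy a b with h | h | h
    · simp [h, not_lt.mpr h.le, pvOk, ih]
    · simp [h, ih]
    · simp only [if_neg (not_lt.mpr h.le), h, true_and]
      cases inc <;> simp [pvOk, ih]

theorem pvOk_true_eq (s : List Char) (hs : ∀ c ∈ s, c = '+' ∨ c = '-') :
    pvOk true s = decide (s.count '-' = 0) := by
  induction s with
  | nil => rfl
  | cons c t ih =>
    have ht : ∀ x ∈ t, x = '+' ∨ x = '-' := fun x hx => hs x (List.mem_cons_of_mem _ hx)
    rcases hs c List.mem_cons_self with h | h <;> subst h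
    · simp [pvOk, ih ht]
    · simp [pvOk]

-- A side, post-loop block: equals the state machine when esConc = false
theorem pvTailA_eq_pvOk (s : List Char) (hs : ∀ c ∈ s, c = '+' ∨ c = '-') :
    pvTailA s false = pvOk false s := by
  induction s with
  | nil => rfl
  | cons c t ih =>
    have ht : ∀ x ∈ t, x = '+' ∨ x = '-' := fun x hx => hs x (List.mem_cons_of_mem _ hx)
    rcases hs c List.mem_cons_self with h | h <;> subst h
    · -- c = '+'
      by_cases hm : t.count '-' = 0
      · simp [pvTailA, pvOk, hm, pvOk_true_eq t ht]
      · obtain ⟨j, hj⟩ := Option.isSome_iff_exists.mp ((PySem.List.index?_isSome_iff t '-').mpr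
          (by by_contra hn; exact hm (List.count_eq_zero.mpr hn)))
        have hj' : List.idxOf? '-' t = some j := by simpa using hj
        have him' : List.idxOf? '-' ('+' :: t) = some (j + 1) := by simp [List.idxOf?_cons, hj']
        have hip0 : List.idxOf? '+' ('+' :: t) = some 0 := by simp [List.idxOf?_cons]
        simp [pvTailA, pvOk, hm, him', hip0, pvOk_true_eq t ht]
    · -- c = '-'
      have him0 : List.idxOf? '-' ('-' :: t) = some 0 := by simp [List.idxOf?_cons]
      have hR : pvOk false ('-' :: t) = pvOk false t := by simp [pvOk]
      by_cases hp : t.count '+' = 0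
      · have h1 : pvTailA t false = true := by simp [pvTailA, hp]
        rw [hR, ← ih ht, h1]
        simp [pvTailA, hp]
      · obtain ⟨i, hi⟩ := Option.isSome_iff_exists.mp ((PySem.List.index?_isSome_iff t '+').mpr
          (by by_contra hn; exact hp (List.count_eq_zero.mpr hn)))
        have hi' : List.idxOf? '+' t = some i := by simpa using hi
        have hip1 : List.idxOf? '+' ('-' :: t) = some (i + 1) := by simp [List.idxOf?_cons, hi']
        have hslice1 : PySem.List.slice ('-' :: t) (some ((i : Int) + 1)) none = t.drop i := by
          have hc : ((i : Int) + 1) = ((i + 1 : Nat) : Int) := by push_cast; ring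
          rw [hc, PySem.List.slice_from_natCast, List.drop_succ_cons]
        have hL : pvTailA ('-' :: t) false = decide ((t.drop i).count '-' = 0) := by
          simp [pvTailA, hp, him0, hip1, hslice1]
        by_cases hm : t.count '-' = 0
        · have hd : (t.drop i).count '-' = 0 :=
            Nat.le_zero.mp (hm ▸ (List.drop_sublist i t).count_le '-')
          have h1 : pvTailA t false = true := by simp [pvTailA, hm]
          rw [hR, ← ih ht, h1, hL]
          simp [hd]
        · obtain ⟨j, hj⟩ := Option.isSome_iff_exists.mp ((PySem.List.index?_isSome_iff t '-').mpr
            (by by_contra hn; exact hm (List.count_eq_zero.mpr hn)))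
          have hj' : List.idxOf? '-' t = some j := by simpa using hj
          obtain ⟨hjlt, hjt, -⟩ := PySem.List.getElem_of_index?_eq_some hj
          rw [hR, ← ih ht, hL]
          by_cases hji : j < i
          · have hT : pvTailA t false = decide ((t.drop i).count '-' = 0) := by
              simp [pvTailA, hp, hm, hi', hj', hji, PySem.List.slice_from_natCast]
            rw [hT]
          · have hmemd : '-' ∈ t.drop i := by
              have hlt2 : j - i < (t.drop i).length := by simp; omega
              have h2 : (t.drop i)[j - i] = t[j] := by
                rw [List.getElem_drop]; congr 1; omega
              rw [← hjt, ← h2]; exact List.getElem_mem hlt2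
            have hd : (t.drop i).count '-' ≠ 0 := by
              simpa [List.count_eq_zero] using hmemd
            have hT : pvTailA t false = false := by
              simp [pvTailA, hp, hm, hi', hj', hji]
            rw [hT]
            simp [hd]

-- the chunk A's loop body appends at index v
def pvH (l : List Int) (v : Int) : List Char :=
  if PySem.List.pyGetD l (v + 1) 0 < PySem.List.pyGetD l v 0 then ['-']
  else if PySem.List.pyGetD l v 0 < PySem.List.pyGetD l (v + 1) 0 then ['+']
  else []

theorem pvGetD_shift (x : Int) (t : List Int) (k : Nat) (d : Int) :
    PySem.List.pyGetD (x :: t) ((k : Int) + 1) d = PySem.List.pyGetD t (k : Int) d := by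
  have h := PySem.List.pyGetD_natCast (x :: t) (k + 1) d
  push_cast at h
  rw [h, PySem.List.pyGetD_natCast]
  simp

theorem pvH_shift (x : Int) (t : List Int) (k : Nat) :
    pvH (x :: t) ((k : Int) + 1) = pvH t (k : Int) := by
  have h1 := pvGetD_shift x t k 0
  have h2 := pvGetD_shift x t (k + 1) 0
  push_cast at h2
  simp only [pvH, h1, h2]

theorem pvFlat_eq_pvSigns (l : List Int) :
    (PySem.List.pyRange 0 ((l.length : Int) - 1) 1).flatMap (pvH l) = pvSigns l := by
  match l with
  | [] => simp [PySem.List.pyRange_one_eq_nil (by norm_num : (-1 : Int) ≤ 0), pvSigns]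
  | [_] => simp [PySem.List.pyRange_one_eq_nil (by norm_num : (0 : Int) ≤ 0), pvSigns]
  | a :: b :: r =>
    have ih := pvFlat_eq_pvSigns (b :: r)
    have hlen : ((a :: b :: r).length : Int) - 1 = ((b :: r).length : Int) := by
      push_cast [List.length_cons]; ring
    have hpos : (0 : Int) < ((b :: r).length : Int) := by
      exact_mod_cast Nat.succ_pos r.length
    rw [hlen, PySem.List.pyRange_one_cons hpos]
    rw [List.flatMap_cons, zero_add]
    have hshift : (PySem.List.pyRange 1 ((b :: r).length : Int) 1).flatMap (pvH (a :: b :: r))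
        = (PySem.List.pyRange 0 (((b :: r).length : Int) - 1) 1).flatMap (pvH (b :: r)) := by
      rw [PySem.List.pyRange_one 1, PySem.List.pyRange_one 0]
      rw [List.flatMap_map, List.flatMap_map]
      have harg : (((b :: r).length : Int) - 1 - 0) = (((b :: r).length : Int) - 1) := by ring
      rw [harg]
      congr 1
      funext k
      rw [add_comm (1 : Int) (k : Int), zero_add]
      exact pvH_shift a (b :: r) k
    rw [hshift, ih]
    have e0 : PySem.List.pyGetD (a :: b :: r) 0 0 = a := by simp [pysem]
    have e1 : PySem.List.pyGetD (a :: b :: r) 1 0 = b := by simp [pysem]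
    have h0 : pvH (a :: b :: r) 0 = (if b < a then ['-'] else if a < b then ['+'] else []) := by
      simp only [pvH, zero_add, e0, e1]
    rw [h0]
    rfl
theorem pvFold_eq_pvSigns (l : List Int) :
    (PySem.List.pyRange 0 ((l.length : Int) - 1) 1).foldl (pvStepA l) [] = pvSigns l := by
  have hstep : ∀ (m : List Int), pvStepA m = fun acc v => acc ++ pvH m v := by
    intro m; funext acc v; simp only [pvStepA, pvH]; split_ifs <;> simp
  rw [hstep, PySem.List.foldl_append_eq_flatMap, List.nil_append]
  exact pvFlat_eq_pvSigns l

-- ===== VERDICT (by name: the statement is the Claim_ definition above) =====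
theorem esConcava_spec : Claim_equal_esConcava := by
  intro lista _
  unfold Spec_esConcava esConcava esConcava_alt
  rw [PySem.List.slice_from_one, pvGoB_eq_pvOk, pvFold_eq_pvSigns]
  by_cases h : (0 : Int) ≤ (lista.length : Int) ∧ (lista.length : Int) ≤ 2
  · simp only [if_pos h]
    have h1 : (pvSigns lista).length ≤ 1 := by
      match lista with
      | [] => simp [pvSigns]
      | [_] => simp [pvSigns]
      | [a, b] => simp only [pvSigns]; split_ifs <;> simp
      | _ :: _ :: _ :: _ => simp at h; omega
    rw [pvOk_false_short _ h1]
    simp [pvTailA]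
  · simp only [if_neg h, decide_eq_false h]
    exact pvTailA_eq_pvOk _ (pvSigns_chars lista)
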